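-- pv_equiv track=rewrite | github.com/tianjianl/context_engineering | scripts/proofbench_length_analysis.py | get_gen_lengths_baseline
-- ===== SOURCE A (Python) =====
-- from collections import defaultdict
--
-- def get_gen_lengths_baseline(raw_data):
--     """Return dict: (problem_id, sample_within_problem_idx) -> char_length."""
--     # Baseline: one line per sample, group by problem_id
--     by_problem = defaultdict(list)
--     for item in raw_data:
--         by_problem[item["problem_id"]].append(item)
--
--     lengths = {}
--     for line_idx, (pid, samples) in enumerate(sorted(by_problem.items())):
--         for s_idx, sample in enumerate(samples):
--             gen = sample.get("generation", "")
--             lengths[(line_idx, s_idx)] = len(gen)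
--     return lengths
-- ===== SOURCE B (Python) =====
-- def get_gen_lengths_baseline(raw_data):
--     """Return dict: (problem_id, sample_within_problem_idx) -> char_length."""
--     # Sorted distinct problem ids, then one filtering pass per id; no dict-of-lists.
--     pids = sorted({item["problem_id"] for item in raw_data})
--     return {
--         (i, j): len(item.get("generation", ""))
--         for i, pid in enumerate(pids)
--         for j, item in enumerate(it for it in raw_data if it["problem_id"] == pid)
--     }
-- ===== Notes on version B (the rewrite author's own statement) =====
-- stated objective: alternative
-- what changed: B drops the defaultdict-of-lists grouping and sorted(items): it sorts the distinct problem_ids once and builds the result with a nested dict comprehension that filters raw_data per id, relying on filter order instead of a maintained dict of lists.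
import Mathlib
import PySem

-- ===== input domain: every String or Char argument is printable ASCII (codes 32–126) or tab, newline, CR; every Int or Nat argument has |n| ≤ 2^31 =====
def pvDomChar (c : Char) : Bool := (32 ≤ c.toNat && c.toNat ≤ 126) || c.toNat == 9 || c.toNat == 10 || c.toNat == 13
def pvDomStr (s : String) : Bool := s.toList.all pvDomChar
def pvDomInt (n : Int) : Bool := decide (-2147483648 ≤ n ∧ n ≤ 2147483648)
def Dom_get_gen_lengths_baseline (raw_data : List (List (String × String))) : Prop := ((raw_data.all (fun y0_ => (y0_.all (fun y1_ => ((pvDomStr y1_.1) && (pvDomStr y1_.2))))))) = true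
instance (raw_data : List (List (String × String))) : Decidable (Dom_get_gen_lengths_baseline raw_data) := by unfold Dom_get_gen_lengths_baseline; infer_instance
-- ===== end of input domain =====

-- B replaces A's defaultdict-of-lists grouping + sorted(items) by sorting the distinct
-- problem ids and filtering raw_data once per id (objective: alternative decomposition).

-- item["problem_id"]; Pre_ guarantees the key is present (Python raises KeyError otherwise)
def pvPid (item : List (String × String)) : String :=
  (PySem.Dict.get? (PySem.Dict.mk item) "problem_id").getD ""

-- len(sample.get("generation", ""))
def pvGenLen (item : List (String × String)) : Int :=
  PySem.Str.len (PySem.Dict.getD (PySem.Dict.mk item) "generation" "")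

-- ===== PORT A =====
def get_gen_lengths_baseline (raw_data : List (List (String × String))) : List (Int × Int × Int) :=
  let by_problem : PySem.Dict String (List (List (String × String))) :=
    raw_data.foldl (fun d item => d.modify (pvPid item) [] (· ++ [item])) PySem.Dict.empty
  -- sorted(by_problem.items()): dict keys are distinct, so Python's tuple comparison
  -- never reaches the second component; sorting by the key is exact here
  let sortedItems := PySem.List.sorted by_problem.items (fun p => p.1)
  let lengths : PySem.Dict (Int × Int) Int :=
    (PySem.List.enumerate sortedItems 0).foldl (fun d lp =>
      (PySem.List.enumerate lp.2.2 0).foldl (fun d sp =>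
        d.insert (lp.1, sp.1) (pvGenLen sp.2)) d) PySem.Dict.empty
  lengths.items.map (fun p => (p.1.1, p.1.2, p.2))

-- ===== PORT B =====
def get_gen_lengths_baseline_alt (raw_data : List (List (String × String))) : List (Int × Int × Int) :=
  let pids := PySem.List.sorted (PySem.Set.ofList (raw_data.map pvPid)) (fun k => k)
  let lengths : PySem.Dict (Int × Int) Int :=
    (PySem.List.enumerate pids 0).foldl (fun d ip =>
      (PySem.List.enumerate (raw_data.filter (fun it => pvPid it == ip.2)) 0).foldl (fun d jp =>
        d.insert (ip.1, jp.1) (pvGenLen jp.2)) d) PySem.Dict.empty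
  lengths.items.map (fun p => (p.1.1, p.1.2, p.2))

-- ===== PRECONDITION & SPEC =====
-- Pre_ excludes exactly the inputs where item["problem_id"] raises KeyError in both programs.
def Pre_get_gen_lengths_baseline (raw_data : List (List (String × String))) : Prop :=
  ∀ item ∈ raw_data, "problem_id" ∈ item.map Prod.fst
instance (raw_data : List (List (String × String))) : Decidable (Pre_get_gen_lengths_baseline raw_data) := by unfold Pre_get_gen_lengths_baseline; infer_instance

def pvWitness_get_gen_lengths_baseline : (List (List (String × String))) :=
  [[("problem_id", "p2"), ("generation", "abc")],
   [("problem_id", "p1")],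
   [("problem_id", "p2"), ("generation", "x")]]

def Spec_get_gen_lengths_baseline (raw_data : List (List (String × String))) (out : List (Int × Int × Int)) : Prop := out = get_gen_lengths_baseline_alt raw_data
instance (raw_data : List (List (String × String))) (out : List (Int × Int × Int)) : Decidable (Spec_get_gen_lengths_baseline raw_data out) := by unfold Spec_get_gen_lengths_baseline; infer_instance

-- ===== CLAIM (what is proved, stated in full; the proofs are below) =====
def Claim_equal_get_gen_lengths_baseline : Prop := ∀ (raw_data : List (List (String × String))), Dom_get_gen_lengths_baseline raw_data → Pre_get_gen_lengths_baseline raw_data → Spec_get_gen_lengths_baseline raw_data (get_gen_lengths_baseline raw_data)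

-- ===== LEMMAS AND PROOFS =====

lemma pv_keys_insert {ν : Type} (d : PySem.Dict String ν) (k : String) (v : ν) :
    (d.insert k v).keys = PySem.Set.add d.keys k := by
  by_cases h : k ∈ d.keys
  · rw [PySem.Dict.keys_insert_of_contains d v (by simpa [PySem.Dict.contains_iff_mem_keys] using h),
        PySem.Set.add_of_mem h]
  · rw [PySem.Dict.keys_insert_of_not_contains d v (by simpa [PySem.Dict.contains_iff_mem_keys, ← Bool.not_eq_true] using h),
        PySem.Set.add_of_not_mem h]

lemma pv_keys_fold (l : List (List (String × String)))
    (d : PySem.Dict String (List (List (String × String)))) :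
    (l.foldl (fun d item => d.modify (pvPid item) [] (· ++ [item])) d).keys =
      PySem.Set.update d.keys (l.map pvPid) := by
  induction l generalizing d with
  | nil => simp [PySem.Set.update_nil]
  | cons x xs ih =>
    simp only [List.foldl_cons, List.map_cons, PySem.Set.update_cons, ih]
    congr 1
    rw [PySem.Dict.keys_modify, pv_keys_insert]

lemma pv_keys (raw_data : List (List (String × String))) :
    (raw_data.foldl (fun d item => d.modify (pvPid item) [] (· ++ [item])) PySem.Dict.empty).keys =
      PySem.Set.ofList (raw_data.map pvPid) := by
  rw [pv_keys_fold]
  simp [PySem.Dict.keys_empty, PySem.Set.update_nil_left]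

lemma pv_getD (raw_data : List (List (String × String))) (k : String) :
    (raw_data.foldl (fun d item => d.modify (pvPid item) [] (· ++ [item])) PySem.Dict.empty).getD k [] =
      raw_data.filter (fun it => pvPid it == k) := by
  have h : raw_data.foldl (fun d item => d.modify (pvPid item) [] (· ++ [item])) PySem.Dict.empty =
      (raw_data.map (fun it => (pvPid it, it))).foldl
        (fun d p => d.modify p.1 [] (· ++ [p.2])) PySem.Dict.empty := by
    rw [List.foldl_map]
  rw [h, PySem.Dict.getD_foldl_modify_append]
  simp [List.filter_map, Function.comp_def]

lemma pv_items_eq (raw_data : List (List (String × String))) :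
    (raw_data.foldl (fun d item => d.modify (pvPid item) [] (· ++ [item])) PySem.Dict.empty).items =
      (raw_data.foldl (fun d item => d.modify (pvPid item) [] (· ++ [item])) PySem.Dict.empty).keys.map
        (fun k => (k, raw_data.filter (fun it => pvPid it == k))) := by
  set d := raw_data.foldl (fun d item => d.modify (pvPid item) [] (· ++ [item])) PySem.Dict.empty with hd
  have hnd : d.keys.Nodup := by
    rw [hd, pv_keys]; exact PySem.Set.nodup_ofList _
  have hkeys : d.keys = d.items.map Prod.fst := rfl
  rw [hkeys, List.map_map]
  symm
  calc d.items.map ((fun k => (k, raw_data.filter (fun it => pvPid it == k))) ∘ Prod.fst)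
      = d.items.map id := by
        apply List.map_congr_left
        intro p hp
        have h1 : d.getD p.1 [] = p.2 :=
          PySem.Dict.getD_of_mem_items d (by exact (Prod.mk.eta (p := p)) ▸ hp) hnd []
        have h2 : raw_data.filter (fun it => pvPid it == p.1) = p.2 := by
          rw [← h1, hd, pv_getD]
        simp only [Function.comp, id, h2]
    _ = d.items := List.map_id d.items

-- list(enumerate(xs.map f, s)) pushes the map outside
lemma pv_enumerate_map {α β : Type} (f : α → β) (xs : List α) (s : Int) :
    PySem.List.enumerate (xs.map f) s =
      (PySem.List.enumerate xs s).map (fun p => (p.1, f p.2)) := by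
  induction xs generalizing s with
  | nil => simp [PySem.List.enumerate_nil]
  | cons x t ih => simp [PySem.List.enumerate_cons, ih]

-- A's sorted(by_problem.items()) is exactly B's sorted distinct ids paired with the filters
lemma pv_sorted_items (raw_data : List (List (String × String))) :
    PySem.List.sorted (raw_data.foldl (fun d item => d.modify (pvPid item) [] (· ++ [item])) PySem.Dict.empty).items (fun p => p.1) =
      (PySem.List.sorted (PySem.Set.ofList (raw_data.map pvPid)) (fun k => k)).map
        (fun k => (k, raw_data.filter (fun it => pvPid it == k))) := by
  apply PySem.List.sorted_eq_of_perm_of_pairwise_lt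
  · rw [pv_items_eq, pv_keys]
    exact List.Perm.map _ (PySem.List.sorted_perm _ _ _)
  · have := PySem.List.sorted_ofList_pairwise_lt (raw_data.map pvPid)
    exact (List.pairwise_map).mpr (by simpa using this)

-- ===== VERDICT (by name: the statement is the Claim_ definition above) =====
theorem get_gen_lengths_baseline_spec : Claim_equal_get_gen_lengths_baseline := by
  intro raw_data _ _
  unfold Spec_get_gen_lengths_baseline
  simp only [get_gen_lengths_baseline, get_gen_lengths_baseline_alt,
    pv_sorted_items, pv_enumerate_map, List.foldl_map]
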